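-- pv_equiv track=rewrite | github.com/dida-do/eurocropsml | eurocropsml/dataset/utils.py | _filter_classes
-- ===== SOURCE A (Python) =====
-- from collections import defaultdict
--
-- def _filter_classes(
--     file_list: list[str],
--     pretrain_classes: set[int],
--     finetune_classes: set[int] | None,
-- ) -> tuple[dict[int, list[str]], dict[int, list[str]] | None]:
--     pretrain_dict: dict[int, list[str]] = defaultdict(list)
--     finetune_dict: dict[int, list[str]] = defaultdict(list)
--     pretrain_dict = {
--         identifier: [file for file in file_list if str(identifier) in file]
--         for identifier in pretrain_classes
--     }
--     if finetune_classes is not None: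
--         finetune_dict = {
--             identifier: [file for file in file_list if str(identifier) in file]
--             for identifier in finetune_classes
--         }
--         return pretrain_dict, finetune_dict
--     else:
--         return pretrain_dict, None
-- ===== SOURCE B (Python) =====
-- def _filter_classes(file_list, pretrain_classes, finetune_classes):
--     def group(classes):
--         # one bucket per distinct identifier, str() computed once
--         pats = {}
--         for ident in classes:
--             if ident not in pats:
--                 pats[ident] = (str(ident), [])
--         # single pass over the files, filling every matching bucket
--         for f in file_list:
--             for s, bucket in pats.values():
--                 if s in f:
--                     bucket.append(f)
--         return {k: b for k, (_, b) in pats.items()}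
--
--     pre = group(pretrain_classes)
--     fin = group(finetune_classes) if finetune_classes is not None else None
--     return pre, fin
-- ===== Notes on version B (the rewrite author's own statement) =====
-- stated objective: faster
-- what changed: B transposes the loops: instead of scanning the whole file list once per class identifier (recomputing str(identifier) for every file), it builds one bucket per distinct identifier with its string form computed once, then fills all buckets in a single pass over the files.
import Mathlib
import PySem

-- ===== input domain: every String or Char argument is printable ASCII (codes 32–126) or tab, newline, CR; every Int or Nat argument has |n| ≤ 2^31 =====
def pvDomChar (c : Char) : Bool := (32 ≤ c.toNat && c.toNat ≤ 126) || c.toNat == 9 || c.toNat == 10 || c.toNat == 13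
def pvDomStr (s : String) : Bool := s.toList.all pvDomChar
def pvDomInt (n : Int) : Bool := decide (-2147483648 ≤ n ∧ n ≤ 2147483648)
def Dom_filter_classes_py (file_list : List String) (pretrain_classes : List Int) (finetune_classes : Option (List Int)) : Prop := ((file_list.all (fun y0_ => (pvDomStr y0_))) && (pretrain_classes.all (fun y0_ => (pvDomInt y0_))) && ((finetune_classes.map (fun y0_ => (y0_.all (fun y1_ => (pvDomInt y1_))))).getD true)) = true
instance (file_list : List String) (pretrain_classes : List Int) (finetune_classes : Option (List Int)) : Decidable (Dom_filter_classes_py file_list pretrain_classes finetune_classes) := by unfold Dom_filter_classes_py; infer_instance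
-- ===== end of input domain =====

-- B transposes A's loops (one bucket per distinct identifier, filled in a single pass over
-- the files, str(identifier) computed once) — an alternative decomposition, same results.


-- ===== PORT A =====
-- dict comprehension over the classes: one scan of file_list per identifier
def filter_classes_py (file_list : List String) (pretrain_classes : List Int) (finetune_classes : Option (List Int)) : (List (Int × List String)) × (Option (List (Int × List String))) :=
  let grp := fun (classes : List Int) =>
    (classes.foldl
      (fun (d : PySem.Dict Int (List String)) identifier =>
        d.insert identifier
          (file_list.filter (fun file => PySem.Str.isIn (PySem.Int.toStr identifier) file)))
      PySem.Dict.empty).items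
  (grp pretrain_classes, finetune_classes.map grp)

-- ===== PORT B =====
-- buckets keyed by distinct identifier (str computed once), filled in one pass over the files
def filter_classes_py_alt (file_list : List String) (pretrain_classes : List Int) (finetune_classes : Option (List Int)) : (List (Int × List String)) × (Option (List (Int × List String))) :=
  let group := fun (classes : List Int) =>
    let pats := classes.foldl
      (fun (acc : List (Int × String × List String)) ident =>
        if acc.any (fun p => p.1 == ident) then acc
        else acc ++ [(ident, PySem.Int.toStr ident, [])]) []
    let filled := file_list.foldl
      (fun pats f =>
        pats.map (fun p =>
          if PySem.Str.isIn p.2.1 f then (p.1, p.2.1, p.2.2 ++ [f]) else p)) pats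
    filled.map (fun p => (p.1, p.2.2))
  (group pretrain_classes, finetune_classes.map group)

-- ===== PRECONDITION & SPEC =====
def Spec_filter_classes_py (file_list : List String) (pretrain_classes : List Int) (finetune_classes : Option (List Int)) (out : (List (Int × List String)) × (Option (List (Int × List String)))) : Prop := out = filter_classes_py_alt file_list pretrain_classes finetune_classes
instance (file_list : List String) (pretrain_classes : List Int) (finetune_classes : Option (List Int)) (out : (List (Int × List String)) × (Option (List (Int × List String)))) : Decidable (Spec_filter_classes_py file_list pretrain_classes finetune_classes out) := by unfold Spec_filter_classes_py; infer_instance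

-- ===== CLAIM (what is proved, stated in full; the proofs are below) =====
def Claim_equal_filter_classes_py : Prop := ∀ (file_list : List String) (pretrain_classes : List Int) (finetune_classes : Option (List Int)), Dom_filter_classes_py file_list pretrain_classes finetune_classes → Spec_filter_classes_py file_list pretrain_classes finetune_classes (filter_classes_py file_list pretrain_classes finetune_classes)

-- ===== LEMMAS AND PROOFS =====

-- A's loop: lookup after the fold is the (key-determined) value iff the key occurred
lemma get?_foldl_insert_keyed (v : Int → List String) :
    ∀ (classes : List Int) (d : PySem.Dict Int (List String)) (k : Int),
      (classes.foldl (fun d id => d.insert id (v id)) d).get? k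
        = if k ∈ classes then some (v k) else d.get? k := by
  intro classes
  induction classes with
  | nil => intro d k; simp
  | cons c cs ih =>
    intro d k
    simp only [List.foldl_cons, ih, PySem.Dict.get?_insert, List.mem_cons]
    by_cases hk : k ∈ cs
    · simp [hk]
    · by_cases hc : k = c <;> simp [hk, hc]

-- A's dict comprehension, characterised: distinct keys in first-occurrence order, keyed values
lemma grpA_eq (file_list : List String) (classes : List Int) :
    (classes.foldl
      (fun (d : PySem.Dict Int (List String)) identifier =>
        d.insert identifier
          (file_list.filter (fun file => PySem.Str.isIn (PySem.Int.toStr identifier) file)))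
      PySem.Dict.empty).items
    = (PySem.Set.ofList classes).map
        (fun id => (id, file_list.filter (fun file => PySem.Str.isIn (PySem.Int.toStr id) file))) := by
  set v : Int → List String :=
    fun id => file_list.filter (fun file => PySem.Str.isIn (PySem.Int.toStr id) file) with hv
  set d := classes.foldl (fun (d : PySem.Dict Int (List String)) id => d.insert id (v id))
    PySem.Dict.empty with hd
  have hkeys : d.keys = PySem.Set.ofList classes := by
    rw [hd, PySem.Dict.keys_foldl_insert]
    simp [PySem.Set.update_nil_left]
  have hnd : d.keys.Nodup := by rw [hkeys]; exact PySem.Set.nodup_ofList classes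
  rw [PySem.Dict.items_eq_map_keys d hnd [], hkeys]
  apply List.map_congr_left
  intro k hk
  have hkc : k ∈ classes := (PySem.Set.mem_ofList classes k).1 hk
  have : d.get? k = some (v k) := by
    rw [hd, get?_foldl_insert_keyed v classes PySem.Dict.empty k]; simp [hkc]
  simp [PySem.Dict.getD_eq_get?_getD, this, hv]

-- B's first loop: add-if-absent over pairs keyed by identifier is Set.ofList, mapped
lemma patsFold_eq (g : Int → String × List String) :
    ∀ (classes : List Int) (s : List Int),
      classes.foldl
        (fun (acc : List (Int × String × List String)) ident =>
          if acc.any (fun p => p.1 == ident) then acc else acc ++ [(ident, g ident)])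
        (s.map (fun id => (id, g id)))
      = (PySem.Set.update s classes).map (fun id => (id, g id)) := by
  intro classes
  induction classes with
  | nil => intro s; simp [PySem.Set.update_nil]
  | cons c cs ih =>
    intro s
    have hany : (s.map (fun id => (id, g id))).any (fun p => p.1 == c) = s.any (fun a => a == c) := by
      rw [List.any_map]; rfl
    rw [List.foldl_cons, PySem.Set.update_cons, hany]
    by_cases hm : c ∈ s
    · have : s.any (fun a => a == c) = true := List.any_eq_true.2 ⟨c, hm, by simp⟩
      rw [this, if_pos rfl, PySem.Set.add_of_mem hm, ih]
    · have : s.any (fun a => a == c) = false := by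
        simp only [List.any_eq_false]; intro a ha; simp; rintro rfl; exact hm ha
      rw [this, if_neg (by simp), PySem.Set.add_of_not_mem hm,
        show (s.map (fun id => (id, g id))) ++ [(c, g c)] = (s ++ [c]).map (fun id => (id, g id)) by simp,
        ih]

-- B's second loop: one pass over the files appends exactly the matching files to each bucket
lemma fillFold_eq :
    ∀ (fl : List String) (P : List (Int × String × List String)),
      fl.foldl
        (fun pats f =>
          pats.map (fun p =>
            if PySem.Str.isIn p.2.1 f then (p.1, p.2.1, p.2.2 ++ [f]) else p)) P
      = P.map (fun p => (p.1, p.2.1, p.2.2 ++ fl.filter (fun f => PySem.Str.isIn p.2.1 f))) := by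
  intro fl
  induction fl with
  | nil => intro P; simp
  | cons f fs ih =>
    intro P
    rw [List.foldl_cons, ih, List.map_map]
    refine List.map_congr_left ?_
    intro p _
    simp only [Function.comp, PySem.Str.isIn_eq, List.filter_cons]
    by_cases h : PySem.Chars.isIn p.2.1.toList f.toList = true
    · simp [h]
    · simp [h]

-- the two per-class group computations coincide
lemma grp_eq (file_list : List String) (classes : List Int) :
    (classes.foldl
      (fun (d : PySem.Dict Int (List String)) identifier =>
        d.insert identifier
          (file_list.filter (fun file => PySem.Str.isIn (PySem.Int.toStr identifier) file)))
      PySem.Dict.empty).items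
    = ((file_list.foldl
        (fun pats f =>
          pats.map (fun p =>
            if PySem.Str.isIn p.2.1 f then (p.1, p.2.1, p.2.2 ++ [f]) else p))
        (classes.foldl
          (fun (acc : List (Int × String × List String)) ident =>
            if acc.any (fun p => p.1 == ident) then acc
            else acc ++ [(ident, PySem.Int.toStr ident, [])]) [])).map
        (fun p => (p.1, p.2.2))) := by
  have h1 : (classes.foldl
      (fun (acc : List (Int × String × List String)) ident =>
        if acc.any (fun p => p.1 == ident) then acc
        else acc ++ [(ident, PySem.Int.toStr ident, [])]) [])
      = (PySem.Set.ofList classes).map (fun id => (id, PySem.Int.toStr id, ([] : List String))) := by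
    have := patsFold_eq (fun id => (PySem.Int.toStr id, ([] : List String))) classes []
    simpa [PySem.Set.update_nil_left] using this
  rw [grpA_eq, h1, fillFold_eq]
  simp only [List.map_map]
  refine List.map_congr_left ?_
  intro id _
  simp [Function.comp]

-- ===== VERDICT (by name: the statement is the Claim_ definition above) =====
theorem filter_classes_py_spec : Claim_equal_filter_classes_py := by
  intro file_list pretrain_classes finetune_classes _
  unfold Spec_filter_classes_py filter_classes_py filter_classes_py_alt
  refine Prod.ext ?_ ?_
  · exact grp_eq file_list pretrain_classes
  · cases finetune_classes with
    | none => rfl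
    | some cs => simpa using grp_eq file_list cs
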